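-- pv_equiv track=rewrite | github.com/dlwnsdyd94/CodingTest_Practice | 2021 KAKAO BLIND RECRUITMENT 신규 아이디 추천/main.py | solution
-- ===== SOURCE A (Python) =====
-- def solution(new_id):
--     answer = ''
--     temp1 = ''
--     temp2 = ''
--
--     # 1단계
--     for a in new_id:
--         if a.isalpha():
--             a = a.lower()
--             temp1 += a
--         else:
--             temp1 += a
--
--     # 2단계
--     for a in temp1:
--         if a.isalpha() or a.isdigit() or a == '-' or a == '_' or a == '.':
--             temp2 += a
--
--     temp1 = ''
--     flag = False
--     # 3단계
--     for a in temp2: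
--         if a == '.' and flag == False:
--             temp1 += a
--             flag = True
--         elif a == '.' and flag == True:
--             continue
--         else:
--             temp1 += a
--             flag = False
--
--     # 4단계
--     while len(temp1) > 0 and temp1[0] == '.':
--         temp1 = temp1[1:]
--
--     while len(temp1) > 0 and temp1[-1] == '.':
--         temp1 = temp1[:-1]
--
--     # 5단계
--     if temp1 == '':
--         temp1 = 'a'
--
--     # 6단계
--     if len(temp1) >= 16:
--         temp1 = temp1[:15]
--
--     while len(temp1) > 0 and temp1[-1] == '.':
--         temp1 = temp1[:-1]
--
--     # 7단계
--     while len(temp1) <= 2: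
--         temp1 += temp1[-1]
--
--     answer = temp1
--
--     return answer
-- ===== SOURCE B (Python) =====
-- def solution(new_id):
--     s = ''.join(c for c in new_id.lower() if c.isalnum() or c in '-_.')
--     s = '.'.join(p for p in s.split('.') if p)
--     if not s:
--         s = 'a'
--     s = s[:15].rstrip('.')
--     return s.ljust(3, s[-1])
-- ===== Notes on version B (the rewrite author's own statement) =====
-- stated objective: simpler
-- what changed: Replaces A's two character-copying loops, flag-based dot-collapse scan and four element-at-a-time while-loops with a comprehension filter over the lowered string, a split-on-dot/filter/join that collapses and trims dot runs in one step, an rstrip of trailing dots, and ljust with the last character for the padding loop.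
import Mathlib
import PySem

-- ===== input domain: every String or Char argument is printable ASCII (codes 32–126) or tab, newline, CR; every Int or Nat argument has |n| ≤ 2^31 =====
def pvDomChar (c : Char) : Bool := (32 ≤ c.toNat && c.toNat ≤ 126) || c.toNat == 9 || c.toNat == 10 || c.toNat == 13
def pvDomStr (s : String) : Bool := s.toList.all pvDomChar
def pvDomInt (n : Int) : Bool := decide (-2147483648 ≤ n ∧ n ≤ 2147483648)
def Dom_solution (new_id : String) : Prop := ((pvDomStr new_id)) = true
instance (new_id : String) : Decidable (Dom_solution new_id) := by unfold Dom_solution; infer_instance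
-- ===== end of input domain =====

-- B replaces A's flag-based dot-collapse scan and four element-at-a-time while-loops with
-- split/filter/join, rstrip and ljust (simpler; a timing run measured it faster by a
-- constant factor). Equivalence proved on all inputs.


-- ===== PORT A =====
-- step 1: lower-case the alphabetic characters
def aStep1 (cs : List Char) : List Char :=
  cs.foldl (fun t a => if PySem.Chars.isalpha a then t ++ [PySem.Chars.lowerChar a] else t ++ [a]) []

-- step 2: keep only alnum and -, _, .
def aStep2 (cs : List Char) : List Char :=
  cs.foldl (fun t a =>
    if PySem.Chars.isalpha a || PySem.Chars.isdigit a || a == '-' || a == '_' || a == '.'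
    then t ++ [a] else t) []

-- step 3: collapse runs of dots, with the flag carried through the fold
def aStep3 (cs : List Char) : List Char :=
  (cs.foldl (fun (st : List Char × Bool) a =>
      if a == '.' && !st.2 then (st.1 ++ [a], true)
      else if a == '.' && st.2 then st
      else (st.1 ++ [a], false)) ([], false)).1

-- step 4a: `while len(temp1) > 0 and temp1[0] == '.': temp1 = temp1[1:]`
def aStripLead : List Char → List Char
  | [] => []
  | c :: rest => if c = '.' then aStripLead rest else c :: rest

-- step 4b/6b: `while len(temp1) > 0 and temp1[-1] == '.': temp1 = temp1[:-1]`
-- (`len > 0 and temp1[-1] == '.'` is exactly `getLast? = some '.'`)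
def aStripTrail (l : List Char) : List Char :=
  if l.getLast? = some '.' then aStripTrail l.dropLast else l
termination_by l.length
decreasing_by
  rename_i h
  cases l with
  | nil => simp at h
  | cons a t => simp [List.length_dropLast]

-- step 7: `while len(temp1) <= 2: temp1 += temp1[-1]` (temp1 is provably nonempty here,
-- so temp1[-1] is its last element)
def aPad (l : List Char) : List Char :=
  if l.length ≤ 2 then aPad (l ++ [l.getLastD 'a']) else l
termination_by 3 - l.length
decreasing_by
  rename_i h
  simp only [List.length_append, List.length_cons, List.length_nil]
  omega

def solution (new_id : String) : String :=
  let temp1 := aStep1 new_id.toList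
  let temp2 := aStep2 temp1
  let t3 := aStep3 temp2
  let t4 := aStripTrail (aStripLead t3)
  let t5 := if t4 = [] then ['a'] else t4
  let t6 := aStripTrail (if 16 ≤ t5.length then t5.take 15 else t5)
  String.ofList (aPad t6)

-- ===== PORT B =====
-- s.rstrip('.')
def bRstripDot (l : List Char) : List Char := (l.reverse.dropWhile (· == '.')).reverse

def solution_alt (new_id : String) : String :=
  -- ''.join(c for c in new_id.lower() if c.isalnum() or c in '-_.')
  let s0 := (PySem.Chars.lower new_id.toList).filter
              (fun c => PySem.Chars.isalnum c || c == '-' || c == '_' || c == '.')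
  -- '.'.join(p for p in s.split('.') if p)
  let s1 := ['.'].intercalate ((s0.splitOn '.').filter (· ≠ []))
  -- if not s: s = 'a'
  let s2 := if s1 = [] then ['a'] else s1
  -- s = s[:15].rstrip('.')
  let s3 := bRstripDot (s2.take 15)
  -- s.ljust(3, s[-1]) (s3 is provably nonempty here, so s[-1] is its last element)
  String.ofList (s3 ++ List.replicate (3 - s3.length) (s3.getLastD 'a'))

-- ===== PRECONDITION & SPEC =====
def Spec_solution (new_id : String) (out : String) : Prop := out = solution_alt new_id
instance (new_id : String) (out : String) : Decidable (Spec_solution new_id out) := by unfold Spec_solution; infer_instance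

-- ===== CLAIM (what is proved, stated in full; the proofs are below) =====
def Claim_equal_solution : Prop := ∀ (new_id : String), Dom_solution new_id → Spec_solution new_id (solution new_id)

-- ===== LEMMAS AND PROOFS =====

-- proof-side model of A's step 3 (structural recursion on the input, flag as parameter)
def colF : Bool → List Char → List Char
  | _, [] => []
  | flag, c :: r =>
    if c = '.' then (if flag then colF true r else '.' :: colF true r)
    else c :: colF false r

-- proof-side model of B's split/filter/join (structural recursion)
mutual
def bnorm : List Char → List Char
  | [] => []
  | c :: r => if c = '.' then bnorm r else c :: bcont r
def bcont : List Char → List Char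
  | [] => []
  | c :: r => if c = '.' then (if bnorm r = [] then [] else '.' :: bnorm r) else c :: bcont r
end

-- per-char: lower-casing only touches alphabetic characters
lemma lowerChar_of_alpha (a : Char) :
    (if PySem.Chars.isalpha a then PySem.Chars.lowerChar a else a) = PySem.Chars.lowerChar a := by
  by_cases h : PySem.Chars.isalpha a
  · simp [h]
  · have hu : PySem.Chars.isupper a = false := by
      simp [PySem.Chars.isalpha] at h; exact h.1
    simp [h, PySem.Chars.lowerChar, hu]

lemma aStep1_eq (cs : List Char) : aStep1 cs = cs.map PySem.Chars.lowerChar := by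
  unfold aStep1
  have : (fun (t : List Char) a => if PySem.Chars.isalpha a then t ++ [PySem.Chars.lowerChar a] else t ++ [a])
       = (fun t a => t ++ [PySem.Chars.lowerChar a]) := by
    funext t a
    by_cases h : PySem.Chars.isalpha a
    · simp [h]
    · have := lowerChar_of_alpha a
      simp only [h] at this
      simp [h, ← this]
  rw [this, PySem.List.foldl_append_singleton_eq_map]
  simp

def keepPred (a : Char) : Bool :=
  PySem.Chars.isalpha a || PySem.Chars.isdigit a || a == '-' || a == '_' || a == '.'

lemma aStep2_eq (cs : List Char) : aStep2 cs = cs.filter keepPred := by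
  unfold aStep2
  have := PySem.List.foldl_append_if keepPred (fun a => a) cs []
  simpa [keepPred] using this

lemma aStep3_inv (cs : List Char) : ∀ (acc : List Char) (flag : Bool),
    (cs.foldl (fun (st : List Char × Bool) a =>
      if a == '.' && !st.2 then (st.1 ++ [a], true)
      else if a == '.' && st.2 then st
      else (st.1 ++ [a], false)) (acc, flag)).1 = acc ++ colF flag cs := by
  induction cs with
  | nil => intro acc flag; simp [colF]
  | cons c r ih =>
    intro acc flag
    by_cases hc : c = '.'
    · cases flag with
      | false => simpa [List.foldl_cons, hc, colF] using ih (acc ++ ['.']) true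
      | true => simpa [List.foldl_cons, hc, colF] using ih acc true
    · cases flag with
      | false => simpa [List.foldl_cons, hc, colF] using ih (acc ++ [c]) false
      | true => simpa [List.foldl_cons, hc, colF] using ih (acc ++ [c]) false

lemma aStep3_eq (cs : List Char) : aStep3 cs = colF false cs := by
  unfold aStep3; simpa using aStep3_inv cs [] false

lemma aStripLead_eq (l : List Char) : aStripLead l = l.dropWhile (· == '.') := by
  induction l with
  | nil => rfl
  | cons c r ih =>
    by_cases hc : c = '.'
    · simp [aStripLead, hc, List.dropWhile, ih]
    · simp [aStripLead, hc]

lemma bRstripDot_nondot {c : Char} (hc : ¬ c = '.') (l : List Char) :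
    bRstripDot (c :: l) = c :: bRstripDot l := by
  unfold bRstripDot
  rw [List.reverse_cons, List.dropWhile_append]
  cases h : (l.reverse.dropWhile (· == '.')).isEmpty with
  | true =>
    have h' : l.reverse.dropWhile (· == '.') = [] := by simpa using h
    simp [hc, h']
  | false =>
    simp

lemma bRstripDot_dot (l : List Char) :
    bRstripDot ('.' :: l) = if bRstripDot l = [] then [] else '.' :: bRstripDot l := by
  unfold bRstripDot
  rw [List.reverse_cons, List.dropWhile_append]
  cases h : (l.reverse.dropWhile (· == '.')).isEmpty with
  | true =>
    have h' : l.reverse.dropWhile (· == '.') = [] := by simpa using h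
    simp [h']
  | false =>
    have h' : ¬ l.reverse.dropWhile (· == '.') = [] := by simpa using h
    simp [h']

lemma bRstripDot_concat_dot (l : List Char) : bRstripDot (l ++ ['.']) = bRstripDot l := by
  unfold bRstripDot
  simp [List.reverse_append]

lemma bRstripDot_concat_nondot {c : Char} (hc : ¬ c = '.') (l : List Char) :
    bRstripDot (l ++ [c]) = l ++ [c] := by
  unfold bRstripDot
  simp [List.reverse_append, hc]

lemma aStripTrail_eq (l : List Char) : aStripTrail l = bRstripDot l := by
  rw [aStripTrail]
  by_cases h : l.getLast? = some '.'
  · have hne : l ≠ [] := by rintro rfl; simp at h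
    have hlast : l = l.dropLast ++ ['.'] := by
      conv_lhs => rw [← List.dropLast_append_getLast hne]
      rw [List.getLast?_eq_some_getLast hne] at h
      simp at h; rw [h]
    rw [if_pos h, aStripTrail_eq l.dropLast]
    conv_rhs => rw [hlast]
    rw [bRstripDot_concat_dot]
  · rw [if_neg h]
    cases hl : l.getLast? with
    | none => rw [List.getLast?_eq_none_iff] at hl; subst hl; rfl
    | some c =>
      have hc : ¬ c = '.' := by rintro rfl; exact h hl
      have hne : l ≠ [] := by rintro rfl; simp at hl
      have : l = l.dropLast ++ [c] := by
        conv_lhs => rw [← List.dropLast_append_getLast hne]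
        rw [List.getLast?_eq_some_getLast hne] at hl
        simp at hl; rw [hl]
      conv_rhs => rw [this, bRstripDot_concat_nondot hc]
      exact this
termination_by l.length
decreasing_by
  cases l with
  | nil => exact absurd rfl hne
  | cons a t => simp [List.length_dropLast]

lemma colF_true_head (l : List Char) :
    colF true l = [] ∨ ∃ c t, colF true l = c :: t ∧ ¬ c = '.' := by
  induction l with
  | nil => left; rfl
  | cons c r ih =>
    by_cases hc : c = '.'
    · simpa [colF, hc] using ih
    · right; exact ⟨c, colF false r, by simp [colF, hc], hc⟩

lemma dropWhile_colF_true (l : List Char) :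
    (colF true l).dropWhile (· == '.') = colF true l := by
  rcases colF_true_head l with h | ⟨d, t, h, hd⟩
  · simp [h]
  · simp [h, hd]

lemma colF_true_eq (l : List Char) :
    colF true l = (colF false l).dropWhile (· == '.') := by
  induction l with
  | nil => rfl
  | cons c r ih =>
    by_cases hc : c = '.'
    · have e1 : colF false (c :: r) = '.' :: colF true r := by simp [colF, hc]
      have e2 : colF true (c :: r) = colF true r := by simp [colF, hc]
      rw [e1, e2, show ('.' :: colF true r).dropWhile (· == '.')
            = (colF true r).dropWhile (· == '.') from by simp]
      exact (dropWhile_colF_true r).symm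
    · simp [colF, hc]

-- the heart of the proof: A's collapse + both strips equals B's recursion model
lemma main_AB (xs : List Char) :
    bRstripDot ((colF false xs).dropWhile (· == '.')) = bnorm xs ∧
    bRstripDot (colF false xs) = bcont xs := by
  induction xs with
  | nil => exact ⟨rfl, rfl⟩
  | cons c r ih =>
    by_cases hc : c = '.'
    · constructor
      · rw [hc]
        show bRstripDot ((colF false ('.' :: r)).dropWhile (· == '.')) = bnorm ('.' :: r)
        have e1 : colF false ('.' :: r) = '.' :: colF true r := by simp [colF]
        rw [e1, show ('.' :: colF true r).dropWhile (· == '.') = (colF true r).dropWhile (· == '.') by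
          simp]
        rw [dropWhile_colF_true, colF_true_eq]
        simpa [bnorm] using ih.1
      · rw [hc]
        have e1 : colF false ('.' :: r) = '.' :: colF true r := by simp [colF]
        rw [e1, bRstripDot_dot, colF_true_eq]
        have h1 : bRstripDot ((colF false r).dropWhile (· == '.')) = bnorm r := ih.1
        rw [h1]
        simp [bcont]
    · have e1 : colF false (c :: r) = c :: colF false r := by simp [colF, hc]
      have e2 : (c :: colF false r).dropWhile (· == '.') = c :: colF false r := by
        simp [hc]
      constructor
      · rw [e1, e2, bRstripDot_nondot hc]
        rw [ih.2]
        simp [bnorm, hc]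
      · rw [e1, bRstripDot_nondot hc, ih.2]
        simp [bcont, hc]

-- dot-prefixed flattening of the remaining (already filtered) segments
def segJoin (L : List (List Char)) : List Char :=
  ((L.filter (· ≠ [])).map (fun s => '.' :: s)).flatten

lemma icat (s : List Char) (m : List (List Char)) :
    ['.'].intercalate (s :: m) = s ++ (m.map (fun t => '.' :: t)).flatten := by
  induction m generalizing s with
  | nil => simp [List.intercalate]
  | cons t m ih =>
    rw [show ['.'].intercalate (s :: t :: m) = s ++ ['.'] ++ ['.'].intercalate (t :: m) from by
      simp [List.intercalate, List.intersperse], ih t]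
    simp

lemma jlem (L : List (List Char)) :
    segJoin L = if ['.'].intercalate (L.filter (· ≠ [])) = [] then []
                else '.' :: ['.'].intercalate (L.filter (· ≠ [])) := by
  induction L with
  | nil => simp [segJoin, List.intercalate]
  | cons s L ih =>
    by_cases hs : s = []
    · simpa [segJoin, hs] using ih
    · have hf : (s :: L).filter (· ≠ []) = s :: L.filter (· ≠ []) := by simp [hs]
      rw [segJoin, hf]
      simp only [List.map_cons, List.flatten_cons, icat]
      have : ((L.filter (· ≠ [])).map (fun t => '.' :: t)).flatten = segJoin L := rfl
      simp [hs]

lemma main_B (xs : List Char) :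
    ['.'].intercalate ((xs.splitOn '.').filter (· ≠ [])) = bnorm xs ∧
    (∀ h t, xs.splitOn '.' = h :: t → h ++ segJoin t = bcont xs) := by
  induction xs with
  | nil =>
    refine ⟨by simp [List.splitOn_nil, List.intercalate, bnorm], ?_⟩
    intro h t he
    simp [List.splitOn_nil] at he
    simp [he.1, he.2, segJoin, bcont]
  | cons c r ih =>
    by_cases hc : c = '.'
    · have hs : (c :: r).splitOn '.' = [] :: r.splitOn '.' := by
        simp [List.splitOn, List.splitOnP_cons, hc]
      constructor
      · rw [hs]
        simpa [bnorm, hc] using ih.1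
      · intro h t he
        rw [hs] at he
        obtain ⟨rfl, rfl⟩ : h = [] ∧ t = r.splitOn '.' := by
          cases he; exact ⟨rfl, rfl⟩
        have : segJoin (r.splitOn '.')
            = if ['.'].intercalate ((r.splitOn '.').filter (· ≠ [])) = [] then []
              else '.' :: ['.'].intercalate ((r.splitOn '.').filter (· ≠ [])) := jlem _
        rw [List.nil_append, this, ih.1]
        simp [bcont, hc]
    · obtain ⟨h', t', hsplit⟩ : ∃ h' t', r.splitOn '.' = h' :: t' := by
        cases hsp : r.splitOn '.' with
        | nil => exact absurd hsp (List.splitOnP_ne_nil _ _)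
        | cons a b => exact ⟨a, b, rfl⟩
      have hs : (c :: r).splitOn '.' = (c :: h') :: t' := by
        simp [List.splitOn, List.splitOnP_cons, hc]
        rw [show (r.splitOnP (· == '.')) = h' :: t' from hsplit]
        rfl
      have hb : h' ++ segJoin t' = bcont r := ih.2 h' t' hsplit
      constructor
      · rw [hs]
        have hf : ((c :: h') :: t').filter (· ≠ []) = (c :: h') :: t'.filter (· ≠ []) := by simp
        rw [hf, icat]
        have : ((t'.filter (· ≠ [])).map (fun t => '.' :: t)).flatten = segJoin t' := rfl
        rw [this]
        simp [bnorm, hc, hb]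
      · intro h t he
        rw [hs] at he
        obtain ⟨rfl, rfl⟩ : h = c :: h' ∧ t = t' := by cases he; exact ⟨rfl, rfl⟩
        simp [bcont, hc, ← hb]

lemma bnorm_head (xs : List Char) :
    bnorm xs = [] ∨ ∃ c t, bnorm xs = c :: t ∧ ¬ c = '.' := by
  induction xs with
  | nil => left; rfl
  | cons c r ih =>
    by_cases hc : c = '.'
    · simpa [bnorm, hc] using ih
    · right; exact ⟨c, bcont r, by simp [bnorm, hc], hc⟩

lemma aPad_eq (n : Nat) : ∀ l : List Char, 3 - l.length ≤ n → l ≠ [] →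
    aPad l = l ++ List.replicate (3 - l.length) (l.getLastD 'a') := by
  induction n with
  | zero =>
    intro l hn _
    rw [aPad, if_neg (by omega)]
    simp [show 3 - l.length = 0 by omega]
  | succ n ih =>
    intro l hn hne
    by_cases h : l.length ≤ 2
    · rw [aPad, if_pos h]
      rw [ih (l ++ [l.getLastD 'a']) (by simp [List.length_append]; omega) (by simp)]
      rw [show (l ++ [l.getLastD 'a']).getLastD 'a' = l.getLastD 'a' by simp]
      rw [List.append_assoc]
      congr 1
      rw [show 3 - l.length = (3 - (l ++ [l.getLastD 'a']).length) + 1 by simp; omega,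
          List.replicate_succ]
      simp
    · rw [aPad, if_neg h]
      simp [show 3 - l.length = 0 by omega]

theorem solution_spec : Claim_equal_solution := by
  intro new_id _
  unfold Spec_solution solution solution_alt
  simp only []
  set cs := new_id.toList with hcs
  have hfront : aStep2 (aStep1 cs) = (PySem.Chars.lower cs).filter
      (fun c => PySem.Chars.isalnum c || c == '-' || c == '_' || c == '.') := by
    rw [aStep1_eq, aStep2_eq]
    show (cs.map PySem.Chars.lowerChar).filter keepPred = _
    rw [show PySem.Chars.lower cs = cs.map PySem.Chars.lowerChar from rfl]
    exact List.filter_congr (fun a _ => by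
      simp [keepPred, PySem.Chars.isalnum, Bool.or_assoc])
  set s0 := (PySem.Chars.lower cs).filter
      (fun c => PySem.Chars.isalnum c || c == '-' || c == '_' || c == '.') with hs0
  rw [hfront]
  have h4 : aStripTrail (aStripLead (aStep3 s0)) = bnorm s0 := by
    rw [aStep3_eq, aStripLead_eq, aStripTrail_eq]
    exact (main_AB s0).1
  have hB : ['.'].intercalate ((s0.splitOn '.').filter (· ≠ [])) = bnorm s0 := (main_B s0).1
  rw [h4, hB]
  set s2 := if bnorm s0 = [] then ['a'] else bnorm s0 with hs2
  have htake : (if 16 ≤ s2.length then s2.take 15 else s2) = s2.take 15 := by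
    by_cases h : 16 ≤ s2.length
    · rw [if_pos h]
    · rw [if_neg h, List.take_of_length_le (by omega)]
  rw [htake, aStripTrail_eq]
  set s3 := bRstripDot (s2.take 15) with hs3
  have hne : s3 ≠ [] := by
    rcases bnorm_head s0 with h | ⟨c, t, h, hc⟩
    · rw [hs3, hs2, if_pos h]
      decide
    · rw [hs3, hs2, if_neg (by simp [h]), h, List.take_succ_cons, bRstripDot_nondot hc]
      simp
  rw [aPad_eq 3 s3 (by omega) hne]
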